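-- pv_equiv track=rewrite | github.com/Beneficial-AI-Foundation/curve25519-dalek-lean-verify | scripts/bench/smt_benchmark.py | find_proof_assign
-- ===== SOURCE A (Python) =====
-- def find_proof_assign(text: str, decl_end: int) -> int:
--     """Return index of ':=' that starts the proof, scanning from decl_end."""
--     depth = 0
--     i = decl_end
--     while i < len(text) - 1:
--         if text[i] == '(':  depth += 1
--         elif text[i] == ')': depth -= 1
--         elif text[i:i+2] == ':=' and depth == 0:
--             return i
--         i += 1
--     return -1
-- ===== SOURCE B (Python) =====
-- def find_proof_assign(text: str, decl_end: int) -> int: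
--     """Return index of ':=' that starts the proof, scanning from decl_end."""
--     depth = 0
--     pos = decl_end
--     while True:
--         cand = text.find(':=', pos)
--         if cand == -1:
--             return -1
--         seg = text[pos:cand]
--         depth += seg.count('(') - seg.count(')')
--         if depth == 0:
--             return cand
--         pos = cand + 1
-- ===== Notes on version B (the rewrite author's own statement) =====
-- stated objective: alternative
-- what changed: Instead of examining every character one at a time with a per-character depth update, B jumps directly between ':=' occurrences via str.find and reconciles the parenthesis depth over each skipped segment with two str.count calls, returning the first candidate where the accumulated depth is zero.
-- outside the precondition, e.g. on find_proof_assign('a:=b', -2): A returns 1, B returns -1; on find_proof_assign(':=', -5): A raises IndexError, B returns 0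
import Mathlib
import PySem

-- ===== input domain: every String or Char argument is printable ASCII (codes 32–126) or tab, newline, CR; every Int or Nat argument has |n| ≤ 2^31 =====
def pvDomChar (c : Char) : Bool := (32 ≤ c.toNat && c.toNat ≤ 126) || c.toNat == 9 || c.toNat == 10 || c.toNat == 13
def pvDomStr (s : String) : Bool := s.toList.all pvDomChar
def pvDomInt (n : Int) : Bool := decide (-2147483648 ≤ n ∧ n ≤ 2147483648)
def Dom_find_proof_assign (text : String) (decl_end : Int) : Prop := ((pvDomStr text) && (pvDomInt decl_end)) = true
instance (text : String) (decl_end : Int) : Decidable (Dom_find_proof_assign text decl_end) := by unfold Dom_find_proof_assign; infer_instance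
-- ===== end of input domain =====

-- B replaces A's character-by-character scan by jumps between ':=' occurrences (str.find),
-- reconciling the parenthesis depth over each skipped segment with str.count (objective: alternative).

-- ===== PORT A =====
-- while i < len(text) - 1: inspect text[i] / text[i:i+2] one character at a time
def pvA_loop (cs : List Char) (depth : Int) (i : Int) : Int :=
  if _h : i < (cs.length : Int) - 1 then
    match PySem.List.pyGet? cs i with
    | none => -1
    | some c =>
      if c = '(' then pvA_loop cs (depth + 1) (i + 1)
      else if c = ')' then pvA_loop cs (depth - 1) (i + 1)
      else if PySem.List.slice cs (some i) (some (i + 2)) = [':', '='] ∧ depth = 0 then i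
      else pvA_loop cs depth (i + 1)
  else -1
termination_by ((cs.length : Int) - 1 - i).toNat
decreasing_by all_goals omega

def find_proof_assign (text : String) (decl_end : Int) : Int :=
  pvA_loop text.toList 0 decl_end

-- ===== PORT B =====
-- Source B's 'while True' loop; the fuel argument is only a totality guard: each iteration moves
-- pos past the previous candidate, so len(text)+1 iterations always suffice and the fuel-0
-- case is never reached for the fuel supplied below
def pvB_loop (cs : List Char) (depth : Int) (pos : Int) : Nat → Int
  | 0 => -1
  | fuel + 1 =>
    let cand := PySem.Chars.findFrom cs [':', '='] pos none
    if cand = -1 then -1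
    else
      let seg := PySem.List.slice cs (some pos) (some cand)
      let depth' := depth + (PySem.Chars.count seg ['('] : Int) - (PySem.Chars.count seg [')'] : Int)
      if depth' = 0 then cand else pvB_loop cs depth' (cand + 1) fuel

def find_proof_assign_alt (text : String) (decl_end : Int) : Int :=
  pvB_loop text.toList 0 decl_end (text.toList.length + 1)

-- ===== PRECONDITION & SPEC =====
-- Pre_ restricts decl_end to the function's natural domain of nonnegative scan positions:
-- for decl_end < -len(text) A raises IndexError, and for -len(text) <= decl_end < 0 Python's
-- negative-index wraparound makes A rescan wrapped positions from the end of the string,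
-- outside the natural domain of this helper (decl_end is a position previously found in text).
def Pre_find_proof_assign (text : String) (decl_end : Int) : Prop := 0 ≤ decl_end
instance (text : String) (decl_end : Int) : Decidable (Pre_find_proof_assign text decl_end) := by unfold Pre_find_proof_assign; infer_instance

def pvWitness_find_proof_assign : String × Int := ("x := 1", 0)

def Spec_find_proof_assign (text : String) (decl_end : Int) (out : Int) : Prop := out = find_proof_assign_alt text decl_end
instance (text : String) (decl_end : Int) (out : Int) : Decidable (Spec_find_proof_assign text decl_end out) := by unfold Spec_find_proof_assign; infer_instance

-- ===== CLAIM (what is proved, stated in full; the proofs are below) =====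
def Claim_equal_find_proof_assign : Prop := ∀ (text : String) (decl_end : Int), Dom_find_proof_assign text decl_end → Pre_find_proof_assign text decl_end → Spec_find_proof_assign text decl_end (find_proof_assign text decl_end)

-- ===== LEMMAS AND PROOFS =====
theorem pvFind_eq (s sub : List Char) (j : Nat) (hj : sub <+: s.drop j)
    (hmin : ∀ i < j, ¬ sub <+: s.drop i) : PySem.Chars.find s sub = (j : Int) := by
  have hinf : PySem.Chars.isIn sub s = true :=
    (PySem.Chars.exists_prefix_drop_iff_isIn sub s).mp ⟨j, hj⟩
  have hnn : 0 ≤ PySem.Chars.find s sub :=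
    (PySem.Chars.find_nonneg_iff s sub).mpr ((PySem.Chars.isIn_iff_infix sub s).mp hinf)
  have hspec := PySem.Chars.find_spec (s := s) (sub := sub) hnn
  have hm : (PySem.Chars.find s sub).toNat = j := by
    rcases Nat.lt_trichotomy (PySem.Chars.find s sub).toNat j with h | h | h
    · exact absurd hspec.1 (hmin _ h)
    · exact h
    · exact absurd hj (hspec.2 j h)
  omega

theorem pvFind_of_prefix (s sub : List Char) (h : sub <+: s) : PySem.Chars.find s sub = 0 := by
  have := pvFind_eq s sub 0 (by simpa using h) (by omega)
  simpa using this

theorem pvFind_cons (c : Char) (t sub : List Char) (h : ¬ sub <+: (c :: t)) :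
    PySem.Chars.find (c :: t) sub =
      if PySem.Chars.find t sub = -1 then -1 else 1 + PySem.Chars.find t sub := by
  by_cases ht : PySem.Chars.find t sub = -1
  · rw [if_pos ht]
    rw [PySem.Chars.find_eq_neg_one_iff] at ht ⊢
    intro hinf
    apply ht
    obtain ⟨j, hj⟩ := (PySem.Chars.exists_prefix_drop_iff_isIn sub (c :: t)).mpr
      ((PySem.Chars.isIn_iff_infix sub (c :: t)).mpr hinf)
    match j, hj with
    | 0, hj => exact absurd hj h
    | (k+1), hj =>
      rw [List.drop_succ_cons] at hj
      exact (PySem.Chars.isIn_iff_infix sub t).mp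
        ((PySem.Chars.exists_prefix_drop_iff_isIn sub t).mp ⟨k, hj⟩)
  · rw [if_neg ht]
    have hnn : 0 ≤ PySem.Chars.find t sub := by
      have := PySem.Chars.neg_one_le_find t sub; omega
    have hspec := PySem.Chars.find_spec (s := t) (sub := sub) hnn
    have := pvFind_eq (c :: t) sub ((PySem.Chars.find t sub).toNat + 1)
      (by rw [List.drop_succ_cons]; exact hspec.1)
      (by
        intro i hi
        match i, hi with
        | 0, _ => exact h
        | (k+1), hi =>
          rw [List.drop_succ_cons]
          exact hspec.2 k (by omega))
    rw [this]; omega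

theorem pvFindFrom_late (cs : List Char) (p : Nat) (hp : cs.length ≤ p + 1) :
    PySem.Chars.findFrom cs [':', '='] (p : Int) none = -1 := by
  simp only [PySem.Chars.findFrom, Int.toNat_natCast, List.take_length]
  rw [if_neg (show ¬((p : Int) < 0) by omega)]
  by_cases hbig : (cs.length : Int) < (p : Int)
  · rw [if_pos hbig]
  · rw [if_neg hbig]
    have hfind : PySem.Chars.find (cs.drop p) [':', '='] = -1 := by
      rw [PySem.Chars.find_eq_neg_one_iff]
      intro hinf
      have := hinf.length_le
      simp at this
      omega
    simp [hfind]

theorem pvCountGo_eq (c : Char) : ∀ (fuel : Nat) (s : List Char) (acc : Nat), s.length ≤ fuel →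
    PySem.Chars.count.go [c] fuel s acc = acc + s.count c := by
  intro fuel
  induction fuel with
  | zero => intro s acc h; match s with
    | [] => simp [PySem.Chars.count.go]
    | x :: t => simp at h
  | succ m ih =>
    intro s acc h
    match s with
    | [] => simp [PySem.Chars.count.go]
    | x :: t =>
      rw [PySem.Chars.count.go]
      by_cases hx : c = x
      · subst hx
        simp [List.isPrefixOf, ih t (acc + 1) (by simpa using h)]
        omega
      · simp [List.isPrefixOf, hx, ih t acc (by simpa using h), List.count_cons]
        simp [Ne.symm hx]

theorem pvCount_singleton (s : List Char) (c : Char) : PySem.Chars.count s [c] = s.count c := by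
  simp [PySem.Chars.count, pvCountGo_eq c s.length s 0 le_rfl]

theorem pvIteCongr (cs : List Char) (x y t : Int) (f : Nat) (h : x = y) :
    (if x = 0 then t else pvB_loop cs x (t + 1) f) = (if y = 0 then t else pvB_loop cs y (t + 1) f) := by
  rw [h]

theorem pvBase (cs : List Char) (p : Nat) (depth : Int) (f : Nat) (hp : cs.length ≤ p + 1) :
    pvA_loop cs depth (p : Int) = pvB_loop cs depth (p : Int) (f + 1) := by
  rw [pvA_loop, pvB_loop]
  rw [dif_neg (show ¬((p : Int) < (cs.length : Int) - 1) by omega)]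
  simp [pvFindFrom_late cs p hp]

theorem pvMain (cs : List Char) : ∀ (n p : Nat) (depth : Int) (f : Nat), cs.length ≤ p + f →
    cs.length ≤ n + p + 1 → pvA_loop cs depth (p : Int) = pvB_loop cs depth (p : Int) (f + 1) := by
  intro n
  induction n with
  | zero => intro p depth f hf hn; exact pvBase cs p depth f (by omega)
  | succ m ih =>
    intro p depth f hf hn
    by_cases hp : cs.length ≤ p + 1
    · exact pvBase cs p depth f hp
    · have hplen : p < cs.length := by omega
      have hget : PySem.List.pyGet? cs (p : Int) = some cs[p] := by
        rw [PySem.List.pyGet?_natCast]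
        exact List.getElem?_eq_getElem hplen
      have hslice : PySem.List.slice cs (some (p : Int)) (some ((p : Int) + 2))
          = (cs.drop p).take 2 := by
        rw [show ((p : Int) + 2) = ((p + 2 : Nat) : Int) by push_cast; ring]
        rw [PySem.List.slice_natCast]
        congr 1
        omega
      have hcond : ((cs.drop p).take 2 = [':', '=']) ↔ ([':', '='] <+: cs.drop p) := by
        rw [List.prefix_iff_eq_take]
        constructor
        · intro h; exact h.symm
        · intro h; exact h.symm
      rw [pvA_loop, dif_pos (show (p : Int) < (cs.length : Int) - 1 by omega)]
      simp only [hget]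
      have hcast : ((p : Int) + 1) = ((p + 1 : Nat) : Int) := by push_cast; ring
      by_cases hocc : [':', '='] <+: cs.drop p
      · -- occurrence at p
        obtain ⟨rest, hrest⟩ := hocc
        have hcp : cs[p] = ':' := by
          have h2 := List.drop_eq_getElem_cons hplen
          rw [← hrest] at h2
          simp only [List.cons_append, List.nil_append, List.cons.injEq] at h2
          exact h2.1.symm
        have hfrom : PySem.Chars.findFrom cs [':', '='] (p : Int) none = (p : Int) := by
          rw [PySem.Chars.findFrom_natCast cs [':', '='] p (le_of_lt hplen)]
          rw [pvFind_of_prefix _ _ ⟨rest, hrest⟩]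
          simp
        have hslice2 : PySem.List.slice cs (some (p : Int)) (some (p : Int)) = ([] : List Char) := by
          rw [PySem.List.slice_natCast]
          simp
        obtain ⟨g, rfl⟩ : ∃ g, f = g + 1 := ⟨f - 1, by omega⟩
        have hB : pvB_loop cs depth (p : Int) (g + 1 + 1) = if depth = 0 then (p : Int) else pvB_loop cs depth ((p : Int) + 1) (g + 1) := by
          rw [pvB_loop]
          simp only [hfrom, hslice2, pvCount_singleton, List.count_nil]
          rw [if_neg (show ¬((p : Int) = -1) by omega)]
          norm_num
        rw [hB]
        simp only [hcp]
        rw [if_neg (show ¬((':' : Char) = '(') by decide), if_neg (show ¬((':' : Char) = ')') by decide)]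
        by_cases hd : depth = 0
        · rw [if_pos ⟨by rw [hslice]; exact hcond.mpr ⟨rest, hrest⟩, hd⟩, if_pos hd]
        · rw [if_neg (fun hco => hd hco.2), if_neg hd, hcast]
          exact ih (p + 1) depth g (by omega) (by omega)
      · -- no occurrence at p
        have hne : PySem.List.slice cs (some (p : Int)) (some ((p : Int) + 2)) ≠ [':', '='] := by
          rw [hslice]; exact fun h => hocc (hcond.mp h)
        have hdrop := List.drop_eq_getElem_cons hplen
        set r' : Int := PySem.Chars.find (List.drop (p + 1) cs) [':', '='] with hr'
        have hfp : PySem.Chars.find (List.drop p cs) [':', '='] = if r' = -1 then -1 else 1 + r' := by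
          rw [hdrop] at hocc ⊢
          exact pvFind_cons _ _ _ hocc
        have hfromp := PySem.Chars.findFrom_natCast cs [':', '='] p (le_of_lt hplen)
        have hfromp1 := PySem.Chars.findFrom_natCast cs [':', '='] (p + 1) (by omega)
        rw [← hr'] at hfromp1
        have hBstep : pvB_loop cs depth (p : Int) (f + 1) =
            pvB_loop cs (depth + (if cs[p] = '(' then 1 else if cs[p] = ')' then -1 else 0)) ((p + 1 : Nat) : Int) (f + 1) := by
          by_cases hr1 : r' = -1
          · have e1 : PySem.Chars.findFrom cs [':', '='] (p : Int) none = -1 := by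
              rw [hfromp, hfp]; simp [hr1]
            have e2 : PySem.Chars.findFrom cs [':', '='] ((p + 1 : Nat) : Int) none = -1 := by
              rw [hfromp1]; simp [hr1]
            conv_lhs => rw [pvB_loop]
            conv_rhs => rw [pvB_loop]
            simp only [e1, e2]
            simp only [if_true]
          · have hr0 : 0 ≤ r' := by
              have := PySem.Chars.neg_one_le_find (List.drop (p + 1) cs) [':', '=']
              omega
            set q : Nat := p + 1 + r'.toNat with hq
            have e1 : PySem.Chars.findFrom cs [':', '='] (p : Int) none = (q : Int) := by
              rw [hfromp, hfp]; simp only [if_neg hr1]; push_cast [hq]; omega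
            have e2 : PySem.Chars.findFrom cs [':', '='] ((p + 1 : Nat) : Int) none = (q : Int) := by
              rw [hfromp1]; simp only [if_neg hr1]; push_cast [hq]; omega
            have hseg : PySem.List.slice cs (some (p : Int)) (some (q : Int)) =
                cs[p] :: PySem.List.slice cs (some ((p + 1 : Nat) : Int)) (some (q : Int)) := by
              rw [PySem.List.slice_natCast, PySem.List.slice_natCast, hdrop]
              rw [show q - p = (q - (p + 1)) + 1 by omega]
              rw [List.take_succ_cons]
            conv_lhs => rw [pvB_loop]
            conv_rhs => rw [pvB_loop]
            simp only [e1, e2]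
            simp only [if_neg (show ¬((q : Int) = -1) by omega)]
            simp only [hseg, pvCount_singleton, List.count_cons]
            refine pvIteCongr cs _ _ _ _ ?_
            by_cases h1 : cs[p] = '('
            · simp only [h1]
              norm_num
              omega
            · by_cases h2 : cs[p] = ')'
              · simp only [h2]
                rw [if_neg (show ¬((')' : Char) = '(') by decide)]
                norm_num
                omega
              · simp only [h1, h2]
                norm_num [h1, h2]
        rw [hBstep]
        by_cases h1 : cs[p] = '('
        · rw [if_pos h1, if_pos h1, hcast]
          exact ih (p + 1) (depth + 1) f (by omega) (by omega)
        · by_cases h2 : cs[p] = ')'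
          · rw [if_neg h1, if_neg h1, if_pos h2, if_pos h2, hcast]
            exact ih (p + 1) (depth - 1) f (by omega) (by omega)
          · rw [if_neg h1, if_neg h1, if_neg h2, if_neg h2]
            rw [if_neg (fun hco => hne hco.1), hcast]
            have := ih (p + 1) (depth + 0) f (by omega) (by omega)
            simpa using this

-- ===== VERDICT (by name: the statement is the Claim_ definition above) =====
theorem find_proof_assign_spec : Claim_equal_find_proof_assign := by
  intro text decl_end _hdom hpre
  unfold Spec_find_proof_assign find_proof_assign find_proof_assign_alt
  obtain ⟨p, rfl⟩ := Int.eq_ofNat_of_zero_le hpre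
  exact pvMain text.toList text.toList.length p 0 text.toList.length (by omega) (by omega)
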